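-- pv_equiv track=rewrite | github.com/tamu-edu/ng911-dev | test_suite/tests/BCF_005/checks.py | _validate_basic_sdp
-- ===== SOURCE A (Python) =====
-- def _validate_basic_sdp(sip_message):
--     """Basic validation that SDP contains essential fields"""
--     lines = sip_message.split("\n")
--     has_version = False
--     has_connection = False
--     has_media = False
--
--     for line in lines:
--         line = line.strip()
--         if line.startswith("v="):
--             has_version = True
--         elif line.startswith("c="):
--             has_connection = True
--         elif line.startswith("m="):
--             has_media = True
--
--     return has_version and has_connection and has_media
-- ===== SOURCE B (Python) =====
-- def _validate_basic_sdp(sip_message):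
--     """Basic validation that SDP contains essential fields"""
--     lines = [line.strip() for line in sip_message.split("\n")]
--     return all(any(line.startswith(prefix) for line in lines)
--                for prefix in ("v=", "c=", "m="))
-- ===== Notes on version B (the rewrite author's own statement) =====
-- stated objective: idiomatic
-- what changed: Replaces the single flag-accumulating loop with one stripping pass plus three independent any() prefix scans combined by all().
import Mathlib
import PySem

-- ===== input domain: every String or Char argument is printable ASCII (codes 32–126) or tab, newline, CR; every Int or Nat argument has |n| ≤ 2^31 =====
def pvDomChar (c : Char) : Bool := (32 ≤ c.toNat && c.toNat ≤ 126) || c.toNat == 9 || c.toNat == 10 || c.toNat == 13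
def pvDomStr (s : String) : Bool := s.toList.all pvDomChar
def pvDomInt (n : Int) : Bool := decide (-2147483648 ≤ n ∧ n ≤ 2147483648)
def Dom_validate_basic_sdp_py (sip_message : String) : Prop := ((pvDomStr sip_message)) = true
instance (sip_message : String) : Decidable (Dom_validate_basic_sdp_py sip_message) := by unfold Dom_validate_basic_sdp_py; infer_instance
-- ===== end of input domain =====

-- B replaces A's single flag-accumulating loop by one stripping pass plus three
-- independent any-scans (one per prefix) combined by all; same O(n) cost, more idiomatic.

-- ===== PORT A =====
-- sip_message.split("\n"): sep "\n" ≠ "", so PySem.Str.split? always returns some; .getD [] only discharges the option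
def validate_basic_sdp_py (sip_message : String) : Bool :=
  let lines := (PySem.Str.split? sip_message "\n").getD []
  let st := lines.foldl (fun (st : Bool × Bool × Bool) line =>
    let line := PySem.Str.strip line
    if PySem.Str.startswith line "v=" then (true, st.2.1, st.2.2)
    else if PySem.Str.startswith line "c=" then (st.1, true, st.2.2)
    else if PySem.Str.startswith line "m=" then (st.1, st.2.1, true)
    else st) (false, false, false)
  st.1 && st.2.1 && st.2.2

-- ===== PORT B =====
def validate_basic_sdp_py_alt (sip_message : String) : Bool :=
  let lines := ((PySem.Str.split? sip_message "\n").getD []).map PySem.Str.strip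
  ["v=", "c=", "m="].all (fun prefix_ => lines.any (fun line => PySem.Str.startswith line prefix_))

-- ===== PRECONDITION & SPEC =====
def Spec_validate_basic_sdp_py (sip_message : String) (out : Bool) : Prop := out = validate_basic_sdp_py_alt sip_message
instance (sip_message : String) (out : Bool) : Decidable (Spec_validate_basic_sdp_py sip_message out) := by unfold Spec_validate_basic_sdp_py; infer_instance

-- ===== CLAIM (what is proved, stated in full; the proofs are below) =====
def Claim_equal_validate_basic_sdp_py : Prop := ∀ (sip_message : String), Dom_validate_basic_sdp_py sip_message → Spec_validate_basic_sdp_py sip_message (validate_basic_sdp_py sip_message)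

-- ===== LEMMAS AND PROOFS =====

-- at most one of the three prefixes matches: distinct first characters
lemma sw_excl (s : List Char) (a b : Char) (tp tq : List Char) (hab : a ≠ b)
    (h : PySem.Chars.startswith s (a :: tp) = true) :
    PySem.Chars.startswith s (b :: tq) = false := by
  by_contra hb
  rw [Bool.not_eq_false, PySem.Chars.startswith_iff] at hb
  rw [PySem.Chars.startswith_iff] at h
  obtain ⟨t, ht⟩ := h
  obtain ⟨u, hu⟩ := hb
  rw [← ht] at hu
  simp at hu
  exact hab hu.1.symm

lemma foldl_flags (ls : List String) (v c m : Bool) :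
    (ls.foldl (fun (st : Bool × Bool × Bool) line =>
      if PySem.Chars.startswith (PySem.Chars.strip line.toList) ['v', '='] then (true, st.2.1, st.2.2)
      else if PySem.Chars.startswith (PySem.Chars.strip line.toList) ['c', '='] then (st.1, true, st.2.2)
      else if PySem.Chars.startswith (PySem.Chars.strip line.toList) ['m', '='] then (st.1, st.2.1, true)
      else st) (v, c, m)) =
    (v || ls.any (fun l => PySem.Chars.startswith (PySem.Chars.strip l.toList) ['v', '=']),
     c || ls.any (fun l => PySem.Chars.startswith (PySem.Chars.strip l.toList) ['c', '=']),
     m || ls.any (fun l => PySem.Chars.startswith (PySem.Chars.strip l.toList) ['m', '='])) := by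
  induction ls generalizing v c m with
  | nil => simp
  | cons l ls ih =>
    simp only [List.foldl_cons, List.any_cons]
    by_cases hv : PySem.Chars.startswith (PySem.Chars.strip l.toList) ['v', '='] = true
    · have hc := sw_excl _ 'v' 'c' ['='] ['='] (by decide) hv
      have hm := sw_excl _ 'v' 'm' ['='] ['='] (by decide) hv
      simp [hv, hc, hm, ih]
    · by_cases hc : PySem.Chars.startswith (PySem.Chars.strip l.toList) ['c', '='] = true
      · have hm := sw_excl _ 'c' 'm' ['='] ['='] (by decide) hc
        simp [hv, hc, hm, ih]
      · by_cases hm : PySem.Chars.startswith (PySem.Chars.strip l.toList) ['m', '='] = true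
        · simp [hv, hc, hm, ih]
        · simp [hv, hc, hm, ih]

-- ===== VERDICT (by name: the statement is the Claim_ definition above) =====
theorem validate_basic_sdp_py_spec : Claim_equal_validate_basic_sdp_py := by
  intro s _
  unfold Spec_validate_basic_sdp_py validate_basic_sdp_py validate_basic_sdp_py_alt
  simp only [PySem.Str.startswith_eq, PySem.Str.toList_strip,
    show ("v=" : String).toList = ['v', '='] from rfl,
    show ("c=" : String).toList = ['c', '='] from rfl,
    show ("m=" : String).toList = ['m', '='] from rfl]
  rw [foldl_flags]
  simp [List.any_map, Function.comp_def, Bool.and_assoc]
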